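-- pv_equiv track=rewrite | github.com/Aleksey-Lyap/codewars_tasks | solve.py | solve
-- ===== SOURCE A (Python) =====
-- def is_prime_number (number):
--     '''Проверяет, является ли число простым.'''
--     if number == 0 or number == 1:
--         return False
--     if number == 2:
--         return True
--     for i in range (2,number):
--         if number % i == 0:
--             return False
--     return True
--
-- def have_prime_digit (number):
--     '''Проверяет число на наличие простых цифр.'''
--     number = str (number)
--     if '2' in number or '3' in number or '5' in number or '7' in number:
--         return True
--     return False
--
-- def solve(index):
--     '''Ищет число n, по индексу.
--     В массиве, в котором нет простых чисел и ни один из его элементов не имеет простых цифр.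
--     '''
--     my_list = []
--     num = 1
--     while len(my_list) != (index+1):
--         if have_prime_digit(num):
--             num += 1
--             continue
--         if is_prime_number(num):
--             num += 1
--             continue
--         my_list.append(num)
--         num += 1
--     return my_list[index]
-- ===== SOURCE B (Python) =====
-- def solve(index):
--     """Nth (0-based) number that is neither prime nor contains a prime digit.
--
--     Enumerates candidates directly: the k-th positive number whose digits all
--     lie in {0,1,4,6,8,9} is obtained by writing k in base 6 and mapping its
--     digits through 0,1,4,6,8,9; then only primality has to be filtered out.
--     """
--     DIGS = [0, 1, 4, 6, 8, 9]
--
--     def candidate(k):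
--         n = 0
--         p = 1
--         while k:
--             n += DIGS[k % 6] * p
--             p *= 10
--             k //= 6
--         return n
--
--     def is_prime(n):
--         if n < 2:
--             return False
--         d = 2
--         while d * d <= n:
--             if n % d == 0:
--                 return False
--             d += 1
--         return True
--
--     seen = -1
--     k = 0
--     while True:
--         k += 1
--         c = candidate(k)
--         if not is_prime(c):
--             seen += 1
--             if seen == index:
--                 return c
-- ===== Notes on version B (the rewrite author's own statement) =====
-- stated objective: faster
-- what changed: Instead of scanning every integer and string-testing its digits, B enumerates exactly the numbers whose digits avoid 2,3,5,7 by writing k in base 6 and mapping digits through 0,1,4,6,8,9 (in increasing order), and filters primes with sqrt-bounded trial division instead of trial division up to n.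
-- outside the precondition, e.g. on solve(-1): A raises IndexError, B does not finish within the time limit
import Mathlib
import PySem

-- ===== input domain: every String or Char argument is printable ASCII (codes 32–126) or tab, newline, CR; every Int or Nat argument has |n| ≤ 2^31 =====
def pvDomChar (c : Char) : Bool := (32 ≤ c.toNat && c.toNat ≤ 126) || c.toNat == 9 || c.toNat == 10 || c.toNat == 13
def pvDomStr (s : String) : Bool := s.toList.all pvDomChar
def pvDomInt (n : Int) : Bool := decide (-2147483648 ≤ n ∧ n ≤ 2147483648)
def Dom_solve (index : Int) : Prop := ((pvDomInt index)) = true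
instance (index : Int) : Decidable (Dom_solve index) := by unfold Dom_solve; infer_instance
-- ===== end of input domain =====

-- B replaces A's scan of every integer by a base-6 enumeration of the no-prime-digit
-- candidates plus sqrt-bounded trial division (objective: faster).

-- ===== PORT A =====
def isPrimeA (number : Int) : Bool :=
  if number == 0 || number == 1 then false
  else if number == 2 then true
  else if (PySem.List.pyRange 2 number 1).any (fun i => PySem.Int.mod number i == 0) then false
  else true

def havePrimeDigitA (number : Int) : Bool :=
  let s := PySem.Int.toStr number
  if PySem.Str.isIn "2" s || PySem.Str.isIn "3" s || PySem.Str.isIn "5" s || PySem.Str.isIn "7" s then true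
  else false

def loopA (fuel : Nat) (index : Int) (myList : List Int) (num : Int) : List Int :=
  match fuel with
  | 0 => myList
  | f + 1 =>
    if (myList.length : Int) == index + 1 then myList
    else if havePrimeDigitA num then loopA f index myList (num + 1)
    else if isPrimeA num then loopA f index myList (num + 1)
    else loopA f index (myList ++ [num]) (num + 1)

-- fuel guard making A's unbounded while-loop total; proved sufficient below
def fuelA (index : Int) : Nat := 16 * (index + 1).toNat * (index + 1).toNat + 1

def solve (index : Int) : Int :=
  PySem.List.pyGetD (loopA (fuelA index) index [] 1) index 0

-- ===== PORT B =====
def candDigits : List Nat := [0, 1, 4, 6, 8, 9]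

def candLoop (k p n : Nat) : Nat :=
  if k = 0 then n
  else candLoop (k / 6) (p * 10) (n + candDigits.getD (k % 6) 0 * p)
decreasing_by exact Nat.div_lt_self (Nat.pos_of_ne_zero (by assumption)) (by omega)

def candB (k : Nat) : Nat := candLoop k 1 0

def isPrimeLoopB (fuel n d : Nat) : Bool :=
  match fuel with
  | 0 => true
  | f + 1 =>
    if n < d * d then true
    else if n % d = 0 then false
    else isPrimeLoopB f n (d + 1)

def isPrimeB (n : Nat) : Bool := if n < 2 then false else isPrimeLoopB n n 2

def loopB (fuel : Nat) (index : Int) (seen : Int) (k : Nat) : Int :=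
  match fuel with
  | 0 => 0
  | f + 1 =>
    let c := candB (k + 1)
    if isPrimeB c then loopB f index seen (k + 1)
    else if seen + 1 == index then (c : Int)
    else loopB f index (seen + 1) (k + 1)

def solve_alt (index : Int) : Int :=
  -- fuel guard making B's unbounded while-loop total; proved sufficient below
  loopB (16 * (index + 1).toNat * (index + 1).toNat + 1) index (-1) 0

-- ===== PRECONDITION & SPEC =====
-- Pre_ excludes index < 0: there A raises IndexError (index = -1) or loops forever (index < -1).
def Pre_solve (index : Int) : Prop := 0 ≤ index
instance (index : Int) : Decidable (Pre_solve index) := by unfold Pre_solve; infer_instance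
def pvWitness_solve : Int := 3

def Spec_solve (index : Int) (out : Int) : Prop := out = solve_alt index
instance (index : Int) (out : Int) : Decidable (Spec_solve index out) := by unfold Spec_solve; infer_instance

-- ===== CLAIM (what is proved, stated in full; the proofs are below) =====
def Claim_equal_solve : Prop := ∀ (index : Int), Dom_solve index → Pre_solve index → Spec_solve index (solve index)

-- ===== LEMMAS AND PROOFS =====

-- the abstract membership test: n's decimal digits avoid 2,3,5,7 and n is not prime
def dOK (d : Nat) : Bool := !(d == 2 || d == 3 || d == 5 || d == 7)
def goodN (n : Nat) : Bool := (Nat.digits 10 n).all dOK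
def okb (n : Nat) : Bool := goodN n && !(decide n.Prime)
def okList (N : Nat) : List Nat := (List.range' 1 N).filter okb

-- generic digit-translation map: base b+2 digits of k, each sent through μ, read in base 10
def digMap (b : Nat) (μ : Nat → Nat) (k : Nat) : Nat :=
  if k = 0 then 0 else 10 * digMap b μ (k / (b + 2)) + μ (k % (b + 2))
decreasing_by exact Nat.div_lt_self (Nat.pos_of_ne_zero (by assumption)) (by omega)

def mD (d : Nat) : Nat := candDigits.getD d 0
def F6 (k : Nat) : Nat := digMap 4 mD k
def m4 (d : Nat) : Nat := [0, 4, 6, 8].getD d 0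
def H4 (k : Nat) : Nat := digMap 2 m4 k
def invD (d : Nat) : Nat := [0, 1, 0, 0, 2, 0, 3, 0, 4, 5].getD d 0

lemma digMap_zero (b : Nat) (μ : Nat → Nat) : digMap b μ 0 = 0 := by rw [digMap]; simp

lemma digMap_eq (b : Nat) (μ : Nat → Nat) (k : Nat) (hk : k ≠ 0) :
    digMap b μ k = 10 * digMap b μ (k / (b + 2)) + μ (k % (b + 2)) := by
  rw [digMap]; simp [hk]

lemma div_pos_of_mod_zero {b k : Nat} (hk : 0 < k) (h : k % (b + 2) = 0) : 0 < k / (b + 2) := by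
  rcases Nat.lt_or_ge k (b + 2) with hlt | hge'
  · rw [Nat.mod_eq_of_lt hlt] at h; omega
  · exact Nat.div_pos hge' (by omega)

lemma digMap_pos (b : Nat) (μ : Nat → Nat) (hp : ∀ d, 0 < d → d < b + 2 → 0 < μ d)
    (k : Nat) (hk : 0 < k) : 0 < digMap b μ k := by
  induction k using Nat.strong_induction_on with
  | _ k ih =>
    rw [digMap_eq b μ k (by omega)]
    rcases Nat.eq_zero_or_pos (k % (b + 2)) with h | h
    · have hq : 0 < k / (b + 2) := div_pos_of_mod_zero hk h
      have := ih (k / (b + 2)) (Nat.div_lt_self (by omega) (by omega)) hq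
      omega
    · have := hp (k % (b + 2)) h (Nat.mod_lt _ (by omega))
      omega

lemma digMap_digits (b : Nat) (μ : Nat → Nat) (hlt : ∀ d, d < b + 2 → μ d < 10)
    (hp : ∀ d, 0 < d → d < b + 2 → 0 < μ d) (k : Nat) :
    Nat.digits 10 (digMap b μ k) = (Nat.digits (b + 2) k).map μ := by
  induction k using Nat.strong_induction_on with
  | _ k ih =>
    rcases Nat.eq_zero_or_pos k with rfl | hk
    · simp [digMap]
    have hpos : 0 < digMap b μ k := digMap_pos b μ hp k hk
    rw [digMap_eq b μ k (by omega)] at hpos ⊢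
    have hμlt : μ (k % (b + 2)) < 10 := hlt _ (Nat.mod_lt _ (by omega))
    rw [Nat.digits_def' (by norm_num : (1:Nat) < 10) hpos,
        Nat.digits_def' (by omega : 1 < b + 2) hk]
    have hmod : (10 * digMap b μ (k / (b + 2)) + μ (k % (b + 2))) % 10 = μ (k % (b + 2)) := by
      omega
    have hdiv : (10 * digMap b μ (k / (b + 2)) + μ (k % (b + 2))) / 10 = digMap b μ (k / (b + 2)) := by
      omega
    rw [hmod, hdiv, List.map_cons, ih (k / (b + 2)) (Nat.div_lt_self (by omega) (by omega))]

lemma digMap_strictMono (b : Nat) (μ : Nat → Nat) (hlt : ∀ d, d < b + 2 → μ d < 10)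
    (hmono : ∀ d e, d < e → e < b + 2 → μ d < μ e) :
    ∀ k j, j < k → digMap b μ j < digMap b μ k := by
  intro k
  induction k using Nat.strong_induction_on with
  | _ k ih =>
    intro j hjk
    rw [digMap_eq b μ k (by omega)]
    rcases Nat.eq_zero_or_pos j with rfl | hj
    · rw [digMap_zero]
      rcases Nat.eq_zero_or_pos (k % (b + 2)) with h | h
      · have hq : 0 < k / (b + 2) := div_pos_of_mod_zero (by omega) h
        have h2 : digMap b μ 0 < digMap b μ (k / (b + 2)) :=
          ih (k / (b + 2)) (Nat.div_lt_self (by omega) (by omega)) 0 hq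
        rw [digMap_zero] at h2
        omega
      · have := hmono 0 (k % (b + 2)) h (Nat.mod_lt _ (by omega))
        omega
    rw [digMap_eq b μ j (by omega)]
    have hqle : j / (b + 2) ≤ k / (b + 2) := Nat.div_le_div_right (by omega)
    have hμj : μ (j % (b + 2)) < 10 := hlt _ (Nat.mod_lt _ (by omega))
    rcases Nat.lt_or_ge (j / (b + 2)) (k / (b + 2)) with hq | hq
    · have hrec : digMap b μ (j / (b + 2)) < digMap b μ (k / (b + 2)) :=
        ih (k / (b + 2)) (Nat.div_lt_self (by omega) (by omega)) _ hq
      omega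
    · have hqeq : j / (b + 2) = k / (b + 2) := by omega
      have hr : j % (b + 2) < k % (b + 2) := by
        have hj' := Nat.div_add_mod j (b + 2)
        have hk' := Nat.div_add_mod k (b + 2)
        rw [hqeq] at hj'
        omega
      have := hmono _ _ hr (Nat.mod_lt _ (by omega))
      rw [hqeq]
      omega

lemma digMap_ge (b : Nat) (μ : Nat → Nat) (hb : b + 2 ≤ 10) (hge : ∀ d, d < b + 2 → d ≤ μ d)
    (k : Nat) : k ≤ digMap b μ k := by
  induction k using Nat.strong_induction_on with
  | _ k ih =>
    rcases Nat.eq_zero_or_pos k with rfl | hk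
    · simp [digMap]
    rw [digMap_eq b μ k (by omega)]
    have h1 := ih (k / (b + 2)) (Nat.div_lt_self (by omega) (by omega))
    have h2 := hge (k % (b + 2)) (Nat.mod_lt _ (by omega))
    have h3 := Nat.div_add_mod k (b + 2)
    have h4 : (b + 2) * (k / (b + 2)) ≤ 10 * (k / (b + 2)) := by
      apply Nat.mul_le_mul_right; omega
    omega

lemma digMap_mono (b : Nat) (μ : Nat → Nat) (hlt : ∀ d, d < b + 2 → μ d < 10)
    (hmono : ∀ d e, d < e → e < b + 2 → μ d < μ e) {j k : Nat} (h : j ≤ k) :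
    digMap b μ j ≤ digMap b μ k := by
  rcases Nat.lt_or_ge j k with h' | h'
  · exact Nat.le_of_lt (digMap_strictMono b μ hlt hmono k j h')
  · have : j = k := le_antisymm h h'
    simp [this]

-- F6 facts
lemma mD_lt (d : Nat) (h : d < 6) : mD d < 10 := by interval_cases d <;> decide
lemma mD_pos (d : Nat) (h0 : 0 < d) (h : d < 6) : 0 < mD d := by interval_cases d <;> decide
lemma mD_mono (d e : Nat) (h : d < e) (he : e < 6) : mD d < mD e := by
  interval_cases e <;> interval_cases d <;> decide
lemma mD_ge (d : Nat) (h : d < 6) : d ≤ mD d := by interval_cases d <;> decide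

lemma F6_pos {k : Nat} (hk : 0 < k) : 0 < F6 k := digMap_pos 4 mD mD_pos k hk
lemma F6_strictMono {j k : Nat} (h : j < k) : F6 j < F6 k :=
  digMap_strictMono 4 mD mD_lt mD_mono k j h
lemma F6_mono {j k : Nat} (h : j ≤ k) : F6 j ≤ F6 k := digMap_mono 4 mD mD_lt mD_mono h
lemma F6_ge (k : Nat) : k ≤ F6 k := digMap_ge 4 mD (by omega) mD_ge k
lemma F6_digits (k : Nat) : Nat.digits 10 (F6 k) = (Nat.digits 6 k).map mD :=
  digMap_digits 4 mD mD_lt mD_pos k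
lemma F6_step {k : Nat} (hk : k ≠ 0) : F6 k = 10 * F6 (k / 6) + mD (k % 6) := by
  rw [F6, digMap_eq _ _ _ hk]
  simp only [show (4 + 2 : Nat) = 6 from rfl]
  rfl

lemma F6_good (k : Nat) : goodN (F6 k) = true := by
  unfold goodN
  rw [F6_digits, List.all_map, List.all_eq_true]
  intro d hd
  have h6 : d < 6 := Nat.digits_lt_base (by norm_num) hd
  interval_cases d <;> decide

lemma goodN_step {n : Nat} (hn : 0 < n) :
    goodN n = (dOK (n % 10) && goodN (n / 10)) := by
  unfold goodN
  rw [Nat.digits_def' (by norm_num : (1:Nat) < 10) hn]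
  simp [List.all_cons]

lemma invD_lt (d : Nat) (h : d < 10) : invD d < 6 := by interval_cases d <;> decide
lemma mD_invD (d : Nat) (h : d < 10) (hd : dOK d = true) : mD (invD d) = d := by
  interval_cases d <;> revert hd <;> decide
lemma invD_pos (d : Nat) (h : d < 10) (hd : dOK d = true) (h0 : d ≠ 0) : 0 < invD d := by
  interval_cases d <;> revert hd h0 <;> decide

lemma F6_surj (n : Nat) (hg : goodN n = true) : ∃ k, k ≤ n ∧ F6 k = n := by
  revert hg
  induction n using Nat.strong_induction_on with
  | _ n ih =>
    intro hg
    rcases Nat.eq_zero_or_pos n with rfl | hn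
    · exact ⟨0, le_refl 0, by simp [F6, digMap_zero]⟩
    rw [goodN_step hn, Bool.and_eq_true] at hg
    obtain ⟨k', hk'le, hk'⟩ := ih (n / 10) (Nat.div_lt_self hn (by norm_num)) hg.2
    have hmod10 : n % 10 < 10 := Nat.mod_lt _ (by norm_num)
    have hr6 : invD (n % 10) < 6 := invD_lt _ hmod10
    have hknz : 6 * k' + invD (n % 10) ≠ 0 := by
      intro h
      have hk'0 : k' = 0 := by omega
      have hr0 : invD (n % 10) = 0 := by omega
      subst hk'0
      rw [F6, digMap_zero] at hk'
      have hnlt : n < 10 := by omega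
      have hm0 : n % 10 ≠ 0 := by omega
      have := invD_pos (n % 10) hmod10 hg.1 hm0
      omega
    have heq : F6 (6 * k' + invD (n % 10)) = n := by
      rw [F6, digMap_eq _ _ _ hknz]
      have hdiv : (6 * k' + invD (n % 10)) / 6 = k' := by omega
      have hmod : (6 * k' + invD (n % 10)) % 6 = invD (n % 10) := by omega
      rw [hdiv, hmod]
      show 10 * F6 k' + mD (invD (n % 10)) = n
      rw [hk', mD_invD _ hmod10 hg.1]
      omega
    have hle : 6 * k' + invD (n % 10) ≤ n := by
      have h := F6_ge (6 * k' + invD (n % 10))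
      rw [heq] at h
      exact h
    exact ⟨_, hle, heq⟩

-- H4 facts
lemma m4_lt (d : Nat) (h : d < 4) : m4 d < 10 := by interval_cases d <;> decide
lemma m4_pos (d : Nat) (h0 : 0 < d) (h : d < 4) : 0 < m4 d := by interval_cases d <;> decide
lemma m4_mono (d e : Nat) (h : d < e) (he : e < 4) : m4 d < m4 e := by
  interval_cases e <;> interval_cases d <;> decide

lemma H4_strictMono {j k : Nat} (h : j < k) : H4 j < H4 k :=
  digMap_strictMono 2 m4 m4_lt m4_mono k j h
lemma H4_good (k : Nat) : goodN (H4 k) = true := by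
  unfold goodN
  rw [H4, digMap_digits 2 m4 m4_lt m4_pos, List.all_map, List.all_eq_true]
  intro d hd
  have h4 : d < 4 := Nat.digits_lt_base (by norm_num) hd
  interval_cases d <;> decide

lemma H4_even (k : Nat) : 2 ∣ H4 k := by
  induction k using Nat.strong_induction_on with
  | _ k ih =>
    rcases Nat.eq_zero_or_pos k with rfl | hk
    · simp [H4, digMap_zero]
    rw [H4, digMap_eq _ _ _ (by omega)]
    have h1 : 2 ∣ m4 (k % 4) := by
      have : k % 4 < 4 := Nat.mod_lt _ (by norm_num)
      interval_cases h : (k % 4) <;> decide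
    have h2 := ih (k / 4) (Nat.div_lt_self hk (by norm_num))
    rw [H4] at h2
    exact dvd_add (h2.mul_left 10) h1

lemma H4_ge4 (k : Nat) (hk : 1 ≤ k) : 4 ≤ H4 k := by
  rw [H4, digMap_eq _ _ _ (by omega)]
  simp only [show (2 + 2 : Nat) = 4 from rfl]
  rcases Nat.lt_or_ge k 4 with h | h
  · have hd : k / 4 = 0 := by omega
    have hm : k % 4 = k := by omega
    rw [hd, hm, digMap_zero]
    interval_cases k <;> decide
  · have hq : 0 < k / 4 := Nat.div_pos h (by norm_num)
    have := digMap_pos 2 m4 m4_pos (k / 4) hq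
    omega

lemma H4_le (k : Nat) : H4 k ≤ 16 * k * k := by
  induction k using Nat.strong_induction_on with
  | _ k ih =>
    rcases Nat.eq_zero_or_pos k with rfl | hk
    · simp [H4, digMap_zero]
    rw [H4, digMap_eq _ _ _ (by omega)]
    have hm : m4 (k % 4) ≤ 8 := by
      have : k % 4 < 4 := Nat.mod_lt _ (by norm_num)
      interval_cases h : (k % 4) <;> decide
    rcases Nat.eq_zero_or_pos (k / 4) with hq | hq
    · rw [hq, digMap_zero]
      nlinarith
    · have h1 := ih (k / 4) (Nat.div_lt_self hk (by norm_num))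
      rw [H4] at h1
      have h2 : 4 * (k / 4) ≤ k := by omega
      nlinarith

lemma H4_ok (k : Nat) (hk : 1 ≤ k) : okb (H4 k) = true := by
  unfold okb
  simp only [H4_good, Bool.true_and, Bool.not_eq_true', decide_eq_false_iff_not]
  intro hp
  have heven : Even (H4 k) := by
    obtain ⟨c, hc⟩ := H4_even k
    exact ⟨c, by omega⟩
  have h2 := (Nat.Prime.even_iff hp).mp heven
  have h4 := H4_ge4 k hk
  omega

-- enough ok numbers below 16*T*T
lemma okList_count (T N : Nat) (hN : 16 * T * T ≤ N) : T ≤ (okList N).length := by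
  classical
  have hpw : ((List.range' 1 T).map H4).Pairwise (· < ·) := by
    rw [List.pairwise_map]
    exact (List.pairwise_lt_range' 1).imp (fun h => H4_strictMono h)
  have hnd : ((List.range' 1 T).map H4).Nodup := hpw.imp (fun h => Nat.ne_of_lt h)
  have hsub : ((List.range' 1 T).map H4) ⊆ okList N := by
    intro x hx
    obtain ⟨k, hk, rfl⟩ := List.mem_map.mp hx
    rw [List.mem_range'_1] at hk
    unfold okList
    rw [List.mem_filter, List.mem_range'_1]
    refine ⟨⟨?_, ?_⟩, H4_ok k hk.1⟩
    · have := H4_ge4 k hk.1; omega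
    · have h1 := H4_le k
      have h2 : 16 * k * k ≤ 16 * T * T := by
        have hkT : k ≤ T := by omega
        exact Nat.mul_le_mul (Nat.mul_le_mul_left 16 hkT) hkT
      omega
  have h1 : ((List.range' 1 T).map H4).toFinset.card = T := by
    rw [List.toFinset_card_of_nodup hnd]
    simp
  have h2 : ((List.range' 1 T).map H4).toFinset ⊆ (okList N).toFinset := by
    intro x hx
    rw [List.mem_toFinset] at *
    exact hsub hx
  have h3 := Finset.card_le_card h2
  have h4 := (okList N).toFinset_card_le
  omega

-- okList structure
lemma range'_one_concat (N : Nat) : List.range' 1 (N + 1) = List.range' 1 N ++ [N + 1] := by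
  rw [List.range'_concat]
  simp [Nat.add_comm]

lemma okList_succ (N : Nat) :
    okList (N + 1) = okList N ++ (if okb (N + 1) then [N + 1] else []) := by
  unfold okList
  rw [range'_one_concat, List.filter_append]
  simp [List.filter_singleton]

lemma okList_prefix {N M : Nat} (h : N ≤ M) : okList N <+: okList M := by
  induction M, h using Nat.le_induction with
  | base => exact List.prefix_refl _
  | succ M hM ih => exact ih.trans ⟨_, (okList_succ M).symm⟩
lemma prefix_getD {l m : List Nat} (h : l <+: m) {i : Nat} (hi : i < l.length) :
    m.getD i 0 = l.getD i 0 := by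
  rw [List.getD_eq_getElem _ _ (lt_of_lt_of_le hi h.length_le), List.getD_eq_getElem _ _ hi]
  exact (h.getElem hi).symm

lemma okList_getD_stable {N M i : Nat} (h : N ≤ M) (hi : i < (okList N).length) :
    (okList M).getD i 0 = (okList N).getD i 0 := by
  have hp := okList_prefix h
  rw [List.getD_eq_getElem _ _ (lt_of_lt_of_le hi hp.length_le),
      List.getD_eq_getElem _ _ hi]
  exact (hp.getElem hi).symm

-- A's tests agree with the abstract ones
lemma toDigitsCore_succ (b f n : Nat) (ds : List Char) :
    Nat.toDigitsCore b (f + 1) n ds =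
      if n / b = 0 then Nat.digitChar (n % b) :: ds
      else Nat.toDigitsCore b f (n / b) (Nat.digitChar (n % b) :: ds) := rfl

lemma toDigitsCore_eq (n : Nat) : ∀ (f : Nat) (acc : List Char), n ≠ 0 → n ≤ f →
    Nat.toDigitsCore 10 f n acc = ((Nat.digits 10 n).map Nat.digitChar).reverse ++ acc := by
  induction n using Nat.strong_induction_on with
  | _ n ih =>
    intro f acc hn hf
    obtain ⟨f', rfl⟩ : ∃ f', f = f' + 1 := ⟨f - 1, by omega⟩
    rw [toDigitsCore_succ]
    by_cases h10 : n / 10 = 0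
    · simp only [h10, if_true]
      rw [Nat.digits_def' (by norm_num : (1:Nat) < 10) (by omega), h10]
      simp
    · simp only [h10, if_false]
      have hlt : n / 10 < n := Nat.div_lt_self (by omega) (by norm_num)
      have h1 : n / 10 ≤ f' := by omega
      rw [ih (n / 10) hlt f' _ h10 h1]
      rw [Nat.digits_def' (by norm_num : (1:Nat) < 10) (show 0 < n by omega), List.map_cons,
        List.reverse_cons, List.append_assoc, List.singleton_append]

lemma singleton_infix {c : Char} {l : List Char} : [c] <:+: l ↔ c ∈ l := by
  constructor
  · intro h
    exact h.subset (List.mem_singleton_self c)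
  · intro h
    obtain ⟨s, t, rfl⟩ := List.append_of_mem h
    exact ⟨s, t, by simp⟩

lemma mem_digitChar_iff (n t : Nat) (ht : t < 10) :
    Nat.digitChar t ∈ (Nat.digits 10 n).map Nat.digitChar ↔ t ∈ Nat.digits 10 n := by
  constructor
  · intro h
    obtain ⟨d, hd, hdc⟩ := List.mem_map.mp h
    have hdlt : d < 10 := Nat.digits_lt_base (by norm_num) hd
    have hdt : d = t := by
      interval_cases d <;> interval_cases t <;> first | rfl | (exfalso; revert hdc; decide)
    exact hdt ▸ hd
  · intro h
    exact List.mem_map.mpr ⟨t, h, rfl⟩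

lemma toChars_natCast (n : Nat) (hn : 1 ≤ n) :
    PySem.Int.toChars (n : Int) = ((Nat.digits 10 n).map Nat.digitChar).reverse := by
  unfold PySem.Int.toChars
  rw [if_neg (show ¬ (n : Int) < 0 by omega), Int.toNat_natCast]
  unfold Nat.toDigits
  rw [toDigitsCore_eq n (n + 1) [] (by omega) (by omega), List.append_nil]

lemma isInDigit_iff (n t : Nat) (hn : 1 ≤ n) (ht : t < 10) :
    (PySem.Str.isIn (String.ofList [Nat.digitChar t]) (PySem.Int.toStr (n : Int)) = true ↔
      t ∈ Nat.digits 10 n) := by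
  rw [PySem.Str.isIn_iff_infix]
  show _ <:+: (String.ofList (PySem.Int.toChars (n : Int))).toList ↔ _
  rw [String.toList_ofList, String.toList_ofList, singleton_infix, toChars_natCast n hn,
    List.mem_reverse, mem_digitChar_iff n t ht]

lemma havePrimeDigitA_eq (n : Nat) (hn : 1 ≤ n) :
    havePrimeDigitA (n : Int) = !(goodN n) := by
  have h2 := isInDigit_iff n 2 hn (by norm_num)
  have h3 := isInDigit_iff n 3 hn (by norm_num)
  have h5 := isInDigit_iff n 5 hn (by norm_num)
  have h7 := isInDigit_iff n 7 hn (by norm_num)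
  rw [show String.ofList [Nat.digitChar 2] = "2" by decide] at h2
  rw [show String.ofList [Nat.digitChar 3] = "3" by decide] at h3
  rw [show String.ofList [Nat.digitChar 5] = "5" by decide] at h5
  rw [show String.ofList [Nat.digitChar 7] = "7" by decide] at h7
  unfold havePrimeDigitA
  by_cases hg : goodN n = true
  · have hnm : ∀ t ∈ Nat.digits 10 n, dOK t = true := List.all_eq_true.mp hg
    have i2 : PySem.Str.isIn "2" (PySem.Int.toStr (n : Int)) = false := by
      rw [Bool.eq_false_iff]; intro h; exact absurd (hnm 2 (h2.mp h)) (by decide)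
    have i3 : PySem.Str.isIn "3" (PySem.Int.toStr (n : Int)) = false := by
      rw [Bool.eq_false_iff]; intro h; exact absurd (hnm 3 (h3.mp h)) (by decide)
    have i5 : PySem.Str.isIn "5" (PySem.Int.toStr (n : Int)) = false := by
      rw [Bool.eq_false_iff]; intro h; exact absurd (hnm 5 (h5.mp h)) (by decide)
    have i7 : PySem.Str.isIn "7" (PySem.Int.toStr (n : Int)) = false := by
      rw [Bool.eq_false_iff]; intro h; exact absurd (hnm 7 (h7.mp h)) (by decide)
    have j2 : PySem.Chars.isIn ['2'] (PySem.Int.toChars (n : Int)) = false := by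
      simpa [PySem.Int.toStr] using i2
    have j3 : PySem.Chars.isIn ['3'] (PySem.Int.toChars (n : Int)) = false := by
      simpa [PySem.Int.toStr] using i3
    have j5 : PySem.Chars.isIn ['5'] (PySem.Int.toChars (n : Int)) = false := by
      simpa [PySem.Int.toStr] using i5
    have j7 : PySem.Chars.isIn ['7'] (PySem.Int.toChars (n : Int)) = false := by
      simpa [PySem.Int.toStr] using i7
    simp [j2, j3, j5, j7, hg]
  · have hgf : goodN n = false := Bool.eq_false_iff.mpr hg
    obtain ⟨d, hd, hdok⟩ := List.all_eq_false.mp hgf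
    rw [Bool.not_eq_true] at hdok
    have hdlt : d < 10 := Nat.digits_lt_base (by norm_num) hd
    rw [hgf]
    interval_cases d <;> revert hdok <;> intro hdok
    · exact absurd hdok (by decide)
    · exact absurd hdok (by decide)
    · have j : PySem.Chars.isIn ['2'] (PySem.Int.toChars (n : Int)) = true := by
        simpa [PySem.Int.toStr] using h2.mpr hd
      simp [j]
    · have j : PySem.Chars.isIn ['3'] (PySem.Int.toChars (n : Int)) = true := by
        simpa [PySem.Int.toStr] using h3.mpr hd
      simp [j]
    · exact absurd hdok (by decide)
    · have j : PySem.Chars.isIn ['5'] (PySem.Int.toChars (n : Int)) = true := by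
        simpa [PySem.Int.toStr] using h5.mpr hd
      simp [j]
    · exact absurd hdok (by decide)
    · have j : PySem.Chars.isIn ['7'] (PySem.Int.toChars (n : Int)) = true := by
        simpa [PySem.Int.toStr] using h7.mpr hd
      simp [j]
    · exact absurd hdok (by decide)
    · exact absurd hdok (by decide)

lemma isPrimeA_eq (n : Nat) : isPrimeA (n : Int) = decide n.Prime := by
  unfold isPrimeA
  rcases Nat.lt_or_ge n 3 with h3 | h3
  · interval_cases n <;> decide
  · have h0 : ((n : Int) == 0) = false := by simp; omega
    have h1 : ((n : Int) == 1) = false := by simp; omega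
    have h2 : ((n : Int) == 2) = false := by simp; omega
    simp only [h0, h1, h2, Bool.or_false]
    rw [Bool.eq_iff_iff, decide_eq_true_iff]
    by_cases hany : (PySem.List.pyRange 2 (n : Int) 1).any (fun i => PySem.Int.mod (n : Int) i == 0) = true
    · simp only [hany, if_true]
      constructor
      · intro h; exact absurd h (by simp)
      · intro hp
        exfalso
        obtain ⟨i, hi, hmod⟩ := List.any_eq_true.mp hany
        rw [PySem.List.mem_pyRange_one] at hi
        rw [beq_iff_eq, PySem.Int.mod_eq_zero_iff_dvd] at hmod
        have him : 0 ≤ i := by omega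
        obtain ⟨m, rfl⟩ : ∃ m : Nat, (m : Int) = i := ⟨i.toNat, Int.toNat_of_nonneg him⟩
        have hdvd : m ∣ n := Int.natCast_dvd_natCast.mp hmod
        have := (Nat.prime_def_lt.mp hp).2 m (by exact_mod_cast hi.2) hdvd
        omega
    · rw [Bool.not_eq_true] at hany
      simp only [hany]
      constructor
      · intro _
        rw [Nat.prime_def_lt]
        refine ⟨by omega, fun m hm hdvd => ?_⟩
        by_contra hm1
        have hm0 : m ≠ 0 := by
          rintro rfl
          rw [Nat.zero_dvd] at hdvd
          omega
        have hm2 : 2 ≤ m := by omega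
        have : (PySem.List.pyRange 2 (n : Int) 1).any (fun i => PySem.Int.mod (n : Int) i == 0) = true := by
          refine List.any_eq_true.mpr ⟨(m : Int), ?_, ?_⟩
          · rw [PySem.List.mem_pyRange_one]
            constructor
            · exact_mod_cast hm2
            · exact_mod_cast hm
          · rw [beq_iff_eq, PySem.Int.mod_eq_zero_iff_dvd]
            exact Int.natCast_dvd_natCast.mpr hdvd
        rw [hany] at this
        exact absurd this (by simp)
      · intro _; rfl

-- B's helpers agree with the abstract ones
lemma candLoop_eq (k : Nat) : ∀ p n, candLoop k p n = n + p * F6 k := by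
  induction k using Nat.strong_induction_on with
  | _ k ih =>
    intro p n
    rcases Nat.eq_zero_or_pos k with rfl | hk
    · rw [candLoop]
      simp [F6, digMap_zero]
    have hk0 : ¬ k = 0 := by omega
    rw [candLoop]
    simp only [hk0, if_false]
    rw [ih (k / 6) (Nat.div_lt_self hk (by norm_num))]
    rw [F6_step hk0]
    unfold mD
    ring
lemma candB_eq (k : Nat) : candB k = F6 k := by
  simp [candB, candLoop_eq]

lemma isPrimeLoopB_eq (n : Nat) : ∀ (f d : Nat), 2 ≤ d → n + 1 ≤ d + f →
    (isPrimeLoopB f n d = true ↔ ∀ m, d ≤ m → m * m ≤ n → ¬ m ∣ n) := by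
  intro f
  induction f with
  | zero =>
    intro d hd hf
    simp only [isPrimeLoopB, true_iff]
    intro m hdm hmm
    have : d ≤ m * m := le_trans hdm (Nat.le_mul_of_pos_left m (by omega))
    omega
  | succ f ihf =>
    intro d hd hf
    rw [isPrimeLoopB]
    by_cases hlt : n < d * d
    · simp only [hlt, if_true, true_iff]
      intro m hdm hmm
      have : d * d ≤ m * m := Nat.mul_le_mul hdm hdm
      omega
    · simp only [hlt, if_false]
      by_cases hmod : n % d = 0
      · simp only [hmod, if_true]
        constructor
        · intro h; exact absurd h (by simp)
        · intro h
          exfalso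
          exact h d (le_refl d) (by omega) (Nat.dvd_of_mod_eq_zero hmod)
      · simp only [hmod, if_false]
        rw [ihf (d + 1) (by omega) (by omega)]
        constructor
        · intro h m hdm hmm hdvd
          rcases Nat.eq_or_lt_of_le hdm with rfl | hlt'
          · exact hmod (Nat.dvd_iff_mod_eq_zero.mp hdvd)
          · exact h m (by omega) hmm hdvd
        · intro h m hdm hmm hdvd
          exact h m (by omega) hmm hdvd

lemma isPrimeB_eq (n : Nat) : isPrimeB n = decide n.Prime := by
  unfold isPrimeB
  rcases Nat.lt_or_ge n 2 with h2 | h2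
  · have hnp : ¬ n.Prime := fun hp => by have := hp.two_le; omega
    simp [h2, hnp]
  · rw [if_neg (by omega)]
    rw [Bool.eq_iff_iff, decide_eq_true_iff]
    rw [isPrimeLoopB_eq n n 2 (le_refl 2) (by omega)]
    constructor
    · intro h
      rw [Nat.prime_def_le_sqrt]
      exact ⟨h2, fun m hm2 hms => h m hm2 (Nat.le_sqrt.mp hms)⟩
    · intro hp m hm2 hmm
      exact (Nat.prime_def_le_sqrt.mp hp).2 m hm2 (Nat.le_sqrt.mpr hmm)

-- the filtered candidate stream is exactly okList
lemma candList_eq (K : Nat) : (List.range' 1 K).map F6 = (List.range' 1 (F6 K)).filter goodN := by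
  have hpw1 : ((List.range' 1 K).map F6).Pairwise (· < ·) := by
    rw [List.pairwise_map]
    exact (List.pairwise_lt_range' 1).imp (fun h => F6_strictMono h)
  have hpw2 : ((List.range' 1 (F6 K)).filter goodN).Pairwise (· < ·) :=
    (List.pairwise_lt_range' 1).filter _
  have hmem : ∀ x, x ∈ (List.range' 1 K).map F6 ↔ x ∈ (List.range' 1 (F6 K)).filter goodN := by
    intro x
    rw [List.mem_map, List.mem_filter, List.mem_range'_1]
    constructor
    · rintro ⟨k, hk, rfl⟩
      rw [List.mem_range'_1] at hk
      refine ⟨⟨F6_pos hk.1, ?_⟩, F6_good k⟩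
      have : F6 k ≤ F6 K := F6_mono (by omega)
      omega
    · rintro ⟨⟨hx1, hx2⟩, hg⟩
      obtain ⟨k, _, hk⟩ := F6_surj x hg
      have hk1 : 1 ≤ k := by
        rcases Nat.eq_zero_or_pos k with rfl | h
        · rw [F6, digMap_zero] at hk; omega
        · exact h
      have hkK : k ≤ K := by
        by_contra hKk
        have : F6 K < F6 k := F6_strictMono (by omega)
        have : F6 K ≤ F6 K := le_refl _
        omega
      exact ⟨k, List.mem_range'_1.mpr ⟨hk1, by omega⟩, hk⟩
  have hperm : ((List.range' 1 K).map F6).Perm ((List.range' 1 (F6 K)).filter goodN) :=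
    (List.perm_ext_iff_of_nodup (hpw1.imp (fun h => Nat.ne_of_lt h))
      (hpw2.imp (fun h => Nat.ne_of_lt h))).mpr hmem
  exact List.Perm.eq_of_pairwise (fun a b _ _ hab hba => by omega) hpw1 hpw2 hperm

def pbList (K : Nat) : List Nat :=
  ((List.range' 1 K).map F6).filter (fun n => !(decide n.Prime))

lemma pbList_eq (K : Nat) : pbList K = okList (F6 K) := by
  unfold pbList okList
  rw [candList_eq, List.filter_filter]
  apply List.filter_congr
  intro x _
  unfold okb
  rw [Bool.and_comm]

lemma pbList_succ (K : Nat) :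
    pbList (K + 1) = pbList K ++ (if decide (F6 (K + 1)).Prime then [] else [F6 (K + 1)]) := by
  unfold pbList
  rw [range'_one_concat, List.map_append, List.filter_append]
  simp only [List.map_cons, List.map_nil, List.filter_cons, List.filter_nil]
  by_cases hp : (F6 (K + 1)).Prime <;> simp [hp]

-- the two loops
lemma loopA_spec (index : Int) (h0 : 0 ≤ index) :
    ∀ (f N : Nat), (okList N).length ≤ (index + 1).toNat →
      (index + 1).toNat ≤ (okList (N + f)).length →
      loopA f index ((okList N).map (fun (n : Nat) => (n : Int))) ((N : Int) + 1) =
        ((okList (N + f)).take (index + 1).toNat).map (fun (n : Nat) => (n : Int)) := by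
  have ht : (((index + 1).toNat : Nat) : Int) = index + 1 := Int.toNat_of_nonneg (by omega)
  intro f
  induction f with
  | zero =>
    intro N hlen hful
    rw [Nat.add_zero] at hful
    simp only [loopA]
    rw [List.take_of_length_le (by omega), Nat.add_zero]
  | succ f ih =>
    intro N hlen hful
    simp only [loopA]
    by_cases hT : (okList N).length = (index + 1).toNat
    · have hc : ((((okList N).map (fun (n : Nat) => (n : Int))).length : Int) == index + 1) = true := by
        rw [beq_iff_eq, List.length_map, hT, ht]
      rw [hc]
      simp only [if_true]
      obtain ⟨rest, hrest⟩ := okList_prefix (show N ≤ N + (f + 1) by omega)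
      rw [← hrest, ← hT, List.take_left]
    · have hc : ((((okList N).map (fun (n : Nat) => (n : Int))).length : Int) == index + 1) = false := by
        rw [beq_eq_false_iff_ne]
        intro heq
        rw [List.length_map, ← ht] at heq
        exact hT (by exact_mod_cast heq)
      rw [hc]
      simp only [Bool.false_eq_true, if_false]
      have hcast : ((N : Int) + 1) = (((N + 1 : Nat) : Nat) : Int) := by push_cast; ring
      rw [hcast, havePrimeDigitA_eq (N + 1) (by omega), isPrimeA_eq (N + 1)]
      have hltT : (okList N).length < (index + 1).toNat := by omega
      by_cases hgood : goodN (N + 1) = true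
      · rw [hgood]
        simp only [Bool.not_true, Bool.false_eq_true, if_false]
        by_cases hp : (N + 1).Prime
        · simp only [hp, decide_true, if_true]
          have hok : okb (N + 1) = false := by unfold okb; simp [hp]
          have hsame : okList (N + 1) = okList N := by rw [okList_succ]; simp [hok]
          have hstep := ih (N + 1) (by rw [hsame]; omega)
            (by rw [show N + 1 + f = N + (f + 1) by omega]; exact hful)
          rw [hsame] at hstep
          rw [hstep, show N + 1 + f = N + (f + 1) from by omega]
        · simp only [hp, decide_false, Bool.false_eq_true, if_false]
          have hok : okb (N + 1) = true := by unfold okb; simp [hgood, hp]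
          have hsucc : okList (N + 1) = okList N ++ [N + 1] := by rw [okList_succ]; simp [hok]
          have hstep := ih (N + 1) (by rw [hsucc]; simp; omega)
            (by rw [show N + 1 + f = N + (f + 1) by omega]; exact hful)
          rw [hsucc, List.map_append, List.map_singleton] at hstep
          rw [hstep, show N + 1 + f = N + (f + 1) from by omega]
      · have hgf : goodN (N + 1) = false := Bool.eq_false_iff.mpr hgood
        rw [hgf]
        simp only [Bool.not_false, if_true]
        have hok : okb (N + 1) = false := by unfold okb; rw [hgf]; simp
        have hsame : okList (N + 1) = okList N := by rw [okList_succ]; simp [hok]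
        have hstep := ih (N + 1) (by rw [hsame]; omega)
          (by rw [show N + 1 + f = N + (f + 1) by omega]; exact hful)
        rw [hsame] at hstep
        rw [hstep, show N + 1 + f = N + (f + 1) from by omega]

lemma pbList_prefix {K M : Nat} (h : K ≤ M) : pbList K <+: pbList M := by
  induction M, h using Nat.le_induction with
  | base => exact List.prefix_refl _
  | succ M hM ih => exact ih.trans ⟨_, (pbList_succ M).symm⟩

lemma loopB_spec (index : Int) (h0 : 0 ≤ index) :
    ∀ (f K : Nat), (pbList K).length < (index + 1).toNat →
      (index + 1).toNat ≤ (pbList (K + f)).length →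
      loopB f index ((pbList K).length - 1 : Int) K =
        ((pbList (K + f)).getD ((index + 1).toNat - 1) 0 : Int) := by
  have ht : (((index + 1).toNat : Nat) : Int) = index + 1 := Int.toNat_of_nonneg (by omega)
  intro f
  induction f with
  | zero =>
    intro K hlen hful
    rw [Nat.add_zero] at hful
    exact absurd hful (by omega)
  | succ f ih =>
    intro K hlen hful
    simp only [loopB]
    rw [candB_eq, isPrimeB_eq]
    by_cases hp : (F6 (K + 1)).Prime
    · simp only [hp, decide_true, if_true]
      have hsame : pbList (K + 1) = pbList K := by rw [pbList_succ]; simp [hp]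
      have hstep := ih (K + 1) (by rw [hsame]; omega)
        (by rw [show K + 1 + f = K + (f + 1) by omega]; exact hful)
      rw [hsame] at hstep
      rw [hstep, show K + 1 + f = K + (f + 1) by omega]
    · simp only [hp, decide_false, Bool.false_eq_true, if_false]
      have hsucc : pbList (K + 1) = pbList K ++ [F6 (K + 1)] := by
        rw [pbList_succ]; simp [hp]
      have hlen1 : (pbList (K + 1)).length = (pbList K).length + 1 := by
        rw [hsucc]; simp
      by_cases hdone : (((pbList K).length : Int) - 1 + 1 == index) = true
      · rw [if_pos hdone]
        rw [beq_iff_eq] at hdone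
        have hTlen : (pbList (K + 1)).length = (index + 1).toNat := by omega
        have hpre : pbList (K + 1) <+: pbList (K + (f + 1)) := pbList_prefix (by omega)
        have hidx : (index + 1).toNat - 1 < (pbList (K + 1)).length := by omega
        have hval : (pbList (K + (f + 1))).getD ((index + 1).toNat - 1) 0 = F6 (K + 1) := by
          rw [prefix_getD hpre hidx, hsucc,
            List.getD_eq_getElem _ _ (by rw [← hsucc]; exact hidx)]
          exact List.getElem_concat_length (by omega) _
        rw [hval]
      · rw [if_neg hdone]
        have hdone' : ((pbList K).length : Int) - 1 + 1 ≠ index := by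
          intro h; exact hdone (beq_iff_eq.mpr h)
        clear hdone
        have hdone := hdone' 
        have hlt1 : (pbList (K + 1)).length < (index + 1).toNat := by
          rcases Nat.lt_or_ge ((pbList (K + 1)).length) ((index + 1).toNat) with h | h
          · exact h
          · exfalso
            have h1 : (pbList (K + 1)).length = (index + 1).toNat := by omega
            exact hdone (by omega)
        have hstep := ih (K + 1) hlt1
          (by rw [show K + 1 + f = K + (f + 1) by omega]; exact hful)
        rw [show ((pbList K).length : Int) - 1 + 1 = ((pbList (K + 1)).length : Int) - 1 by
          rw [hlen1]; push_cast; ring]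
        rw [hstep, show K + 1 + f = K + (f + 1) by omega]

-- ===== VERDICT (by name: the statement is the Claim_ definition above) =====
theorem solve_spec : Claim_equal_solve := by
  unfold Claim_equal_solve
  intro index _ hpre
  unfold Spec_solve Pre_solve at *
  have h0 : 0 ≤ index := hpre
  have ht : (((index + 1).toNat : Nat) : Int) = index + 1 := Int.toNat_of_nonneg (by omega)
  have ht1 : 1 ≤ (index + 1).toNat := by omega
  have hit : index.toNat = (index + 1).toNat - 1 := by omega
  -- A side
  have hcA : (index + 1).toNat ≤ (okList (fuelA index)).length :=
    okList_count _ _ (by unfold fuelA; omega)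
  have hA := loopA_spec index h0 (fuelA index) 0 (by simp [okList]) (by simpa using hcA)
  simp only [show okList 0 = [] from by simp [okList], List.map_nil, Nat.cast_zero,
    zero_add] at hA
  unfold solve
  rw [hA, PySem.List.pyGetD_of_nonneg _ _ h0]
  have hlenL : (((okList (fuelA index)).take (index + 1).toNat).map
      (fun (n : Nat) => (n : Int))).length = (index + 1).toNat := by
    rw [List.length_map, List.length_take]
    simpa using Nat.min_eq_left hcA
  have hidx : index.toNat < (((okList (fuelA index)).take (index + 1).toNat).map
      (fun (n : Nat) => (n : Int))).length := by omega
  rw [List.getD_eq_getElem _ _ hidx, List.getElem_map, List.getElem_take]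
  -- B side
  have hcB : (index + 1).toNat ≤ (pbList (16 * (index + 1).toNat * (index + 1).toNat + 1)).length := by
    rw [pbList_eq]
    refine okList_count _ _ (le_trans (by omega) (F6_ge _))
  have hB := loopB_spec index h0 (16 * (index + 1).toNat * (index + 1).toNat + 1) 0 (by simp [pbList]; omega)
    (by simpa using hcB)
  simp only [show pbList 0 = [] from by simp [pbList], List.length_nil, Nat.cast_zero,
    zero_sub, zero_add] at hB
  unfold solve_alt
  rw [hB]
  -- combine
  have hstable := okList_getD_stable
    (show fuelA index ≤ F6 (16 * (index + 1).toNat * (index + 1).toNat + 1) from le_trans (le_of_eq rfl) (F6_ge _))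
    (show (index + 1).toNat - 1 < (okList (fuelA index)).length from by omega)
  have hlt0 : index.toNat < (okList (fuelA index)).length := by
    have := lt_of_lt_of_le (show (index + 1).toNat - 1 < (index + 1).toNat from by omega)
      (by simpa using hcA)
    omega
  have hgoal : (okList (fuelA index))[index.toNat]'hlt0 =
      (pbList (16 * (index + 1).toNat * (index + 1).toNat + 1)).getD ((index + 1).toNat - 1) 0 := by
    rw [pbList_eq, hstable]
    rw [List.getD_eq_getElem _ _ (show (index + 1).toNat - 1 < (okList (fuelA index)).length from by omega)]
    congr 1
  exact congrArg _ hgoal
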